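-- pv_equiv track=rewrite | github.com/tatianamathia/codility-p4-dice-rolls | index.py | solution
-- ===== SOURCE A (Python) =====
-- def solution(A, F, M):
--     total_sum_needed = (len(A) + F) * M
--     sum_needed_for_F = total_sum_needed - sum(A)
--
--     if sum_needed_for_F < F or sum_needed_for_F > 6 * F:
--         return [0]
--
--     result = [1] * F
--     forgotten_sum_needed = sum_needed_for_F - F
--
--
--     for i in range(F):
--         add_value = min(5, forgotten_sum_needed)
--         result[i] += add_value
--         forgotten_sum_needed -= add_value
--
--     return result
-- ===== SOURCE B (Python) =====
-- def solution(A, F, M):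
--     total_sum_needed = (len(A) + F) * M
--     sum_needed_for_F = total_sum_needed - sum(A)
--
--     if sum_needed_for_F < F or sum_needed_for_F > 6 * F:
--         return [0]
--
--     q, r = divmod(sum_needed_for_F - F, 5)
--     return ([6] * q + ([1 + r] if q < F else []) + [1] * F)[:F]
-- ===== Notes on version B (the rewrite author's own statement) =====
-- stated objective: simpler
-- what changed: The iterative greedy fill loop (repeatedly adding min(5, remaining) to each slot) is replaced by a closed-form divmod construction: q full 6s, one slot of 1+r, padded with 1s and truncated to F.
import Mathlib
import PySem

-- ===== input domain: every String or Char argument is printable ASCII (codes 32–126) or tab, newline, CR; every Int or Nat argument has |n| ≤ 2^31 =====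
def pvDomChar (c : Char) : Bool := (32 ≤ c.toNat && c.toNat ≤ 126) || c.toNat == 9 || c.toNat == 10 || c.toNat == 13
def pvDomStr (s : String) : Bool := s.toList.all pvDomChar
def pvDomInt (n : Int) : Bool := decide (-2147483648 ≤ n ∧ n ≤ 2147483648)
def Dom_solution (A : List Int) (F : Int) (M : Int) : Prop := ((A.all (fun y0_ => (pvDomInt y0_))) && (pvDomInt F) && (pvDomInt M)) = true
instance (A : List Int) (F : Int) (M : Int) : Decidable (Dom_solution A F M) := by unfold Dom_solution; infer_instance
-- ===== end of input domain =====

-- B replaces A's iterative greedy fill with a closed-form divmod construction (objective: simpler).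

-- ===== PORT A =====
-- the 'for i in range(F)' loop: each iteration adds min(5, remaining) to result[i]
def solutionFill (result : List Int) (forgotten : Int) : List Int :=
  match result with
  | [] => []
  | x :: xs =>
    let add_value := min 5 forgotten
    (x + add_value) :: solutionFill xs (forgotten - add_value)

def solution (A : List Int) (F : Int) (M : Int) : List Int :=
  let total_sum_needed := ((A.length : Int) + F) * M
  let sum_needed_for_F := total_sum_needed - A.sum
  if sum_needed_for_F < F ∨ sum_needed_for_F > 6 * F then [0]
  else
    let result := PySem.List.pyRepeat [1] F
    solutionFill result (sum_needed_for_F - F)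

-- ===== PORT B =====
def solution_alt (A : List Int) (F : Int) (M : Int) : List Int :=
  let total_sum_needed := ((A.length : Int) + F) * M
  let sum_needed_for_F := total_sum_needed - A.sum
  if sum_needed_for_F < F ∨ sum_needed_for_F > 6 * F then [0]
  else
    let q := PySem.Int.floordiv (sum_needed_for_F - F) 5
    let r := PySem.Int.mod (sum_needed_for_F - F) 5
    PySem.List.slice
      (PySem.List.pyRepeat [6] q ++ (if q < F then [1 + r] else []) ++ PySem.List.pyRepeat [1] F)
      none (some F)

-- ===== PRECONDITION & SPEC =====
def Spec_solution (A : List Int) (F : Int) (M : Int) (out : List Int) : Prop := out = solution_alt A F M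
instance (A : List Int) (F : Int) (M : Int) (out : List Int) : Decidable (Spec_solution A F M out) := by unfold Spec_solution; infer_instance

-- ===== CLAIM (what is proved, stated in full; the proofs are below) =====
def Claim_equal_solution : Prop := ∀ (A : List Int) (F : Int) (M : Int), Dom_solution A F M → Spec_solution A F M (solution A F M)

-- ===== LEMMAS AND PROOFS =====

theorem solutionFill_zero (xs : List Int) : solutionFill xs 0 = xs := by
  induction xs with
  | nil => rfl
  | cons x xs ih => simp [solutionFill, ih]

-- trailing padding of 1s beyond the truncation point is irrelevant
theorem take_append_replicate (n m k : Nat) (X : List Int) (hm : n ≤ m) (hk : n ≤ k) :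
    List.take n (X ++ List.replicate m (1 : Int)) = List.take n (X ++ List.replicate k 1) := by
  rw [List.take_append, List.take_append, List.take_replicate, List.take_replicate]
  congr 2
  omega

theorem fill_key (n : Nat) (s : Int) (h0 : 0 ≤ s) (h5 : s ≤ 5 * n) :
    solutionFill (List.replicate n 1) s =
      List.take n (List.replicate (s / 5).toNat 6 ++
        (if s / 5 < (n : Int) then [1 + s % 5] else []) ++ List.replicate n 1) := by
  induction n generalizing s with
  | zero =>
    simp [solutionFill]
  | succ n ih =>
    rw [List.replicate_succ, solutionFill]
    by_cases h : 5 ≤ s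
    · have hmin : min 5 s = 5 := by omega
      have hq : (s / 5).toNat = ((s - 5) / 5).toNat + 1 := by omega
      have hr : s % 5 = (s - 5) % 5 := by omega
      rw [hmin, ih (s - 5) (by omega) (by omega)]
      rw [hq, hr, List.replicate_succ]
      simp only [List.cons_append, List.take_succ_cons]
      congr 1
      split_ifs with h1 h2 h3
      · rw [show ((1 : Int) :: List.replicate n 1) = List.replicate (n + 1) 1 from rfl]
        exact take_append_replicate n n (n + 1) _ (le_refl n) (by omega)
      · exfalso; push_cast at h2; omega
      · exfalso; push_cast at h3; omega
      · rw [show ((1 : Int) :: List.replicate n 1) = List.replicate (n + 1) 1 from rfl]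
        exact take_append_replicate n n (n + 1) _ (le_refl n) (by omega)
    · have hmin : min 5 s = s := by omega
      have hq : s / 5 = 0 := by omega
      have hr : s % 5 = s := by omega
      rw [hmin, sub_self, solutionFill_zero, hq, hr,
        if_pos (by push_cast; omega : (0 : Int) < ((n + 1 : Nat) : Int))]
      simp only [Int.toNat_zero, List.replicate_zero, List.nil_append, List.cons_append,
        List.take_succ_cons]
      congr 1
      rw [show ((1 : Int) :: List.replicate n 1) = List.replicate (n + 1) 1 from rfl,
        List.take_replicate]
      congr 1
      omega

-- ===== VERDICT (by name: the statement is the Claim_ definition above) =====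
theorem solution_spec : Claim_equal_solution := by
  intro A F M _
  unfold Spec_solution solution solution_alt
  simp only []
  generalize ((A.length : Int) + F) * M - A.sum = s
  by_cases hg : s < F ∨ s > 6 * F
  · simp only [if_pos hg]
  · simp only [if_neg hg]
    have hF : 0 ≤ F := by omega
    have h0 : 0 ≤ s - F := by omega
    rw [PySem.List.pyRepeat_singleton, PySem.List.pyRepeat_singleton,
      PySem.List.slice_to _ hF,
      PySem.Int.floordiv_eq_ediv_of_pos (by omega : (0:Int) < 5),
      PySem.Int.mod_eq_emod_of_pos (by omega : (0:Int) < 5)]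
    have h5' : s - F ≤ 5 * ((F.toNat : Nat) : Int) := by omega
    rw [fill_key F.toNat (s - F) h0 (by exact_mod_cast h5'),
      Int.toNat_of_nonneg hF]
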